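-- pv_equiv track=rewrite | github.com/kanak8618/100-Days-Code-Challange | 74 return cap & replace.py | ascii_capitalize
-- ===== SOURCE A (Python) =====
-- def ascii_capitalize(input_str):
--     result = ""
--     for char in input_str:
--         if ord(char) % 2 == 0:
--             result += char.upper()
--         else:
--             result += char.lower()
--     return result
-- ===== SOURCE B (Python) =====
-- def ascii_capitalize(input_str):
--     table = {}
--     for ch in set(input_str):
--         table[ord(ch)] = ch.upper() if ord(ch) % 2 == 0 else ch.lower()
--     return input_str.translate(table)
-- ===== Notes on version B (the rewrite author's own statement) =====
-- stated objective: idiomatic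
-- what changed: Replaces the branch-per-char string accumulation with building a codepoint->replacement translation table over the distinct characters once, then a single lookup-only str.translate pass.
import Mathlib
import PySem

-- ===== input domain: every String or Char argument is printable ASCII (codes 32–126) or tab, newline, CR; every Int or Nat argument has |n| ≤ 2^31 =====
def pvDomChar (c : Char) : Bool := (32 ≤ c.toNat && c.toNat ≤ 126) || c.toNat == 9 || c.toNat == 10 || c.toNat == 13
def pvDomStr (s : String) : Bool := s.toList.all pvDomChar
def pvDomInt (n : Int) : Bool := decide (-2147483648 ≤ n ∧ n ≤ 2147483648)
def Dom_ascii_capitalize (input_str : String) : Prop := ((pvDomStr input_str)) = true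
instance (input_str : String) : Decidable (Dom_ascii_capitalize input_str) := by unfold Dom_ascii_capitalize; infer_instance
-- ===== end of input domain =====

-- B builds a codepoint→replacement translation table over the distinct characters once,
-- then does one lookup-only translate pass (no per-character branching in the traversal).

-- ===== PORT A =====
-- result = ""; for char in input_str: branch on ord(char) % 2 and append char.upper()/char.lower()
def ascii_capitalize (input_str : String) : String :=
  String.mk (input_str.toList.foldl
    (fun result c =>
      if PySem.Int.mod (c.toNat : Int) 2 = 0 then result ++ PySem.Chars.upper [c]
      else result ++ PySem.Chars.lower [c]) [])

-- ===== PORT B =====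
-- table = {ord(ch): ch.upper() if ord(ch)%2==0 else ch.lower() for ch in set(input_str)}
-- return input_str.translate(table): each char replaced by table[ord(char)] if present, kept otherwise
def ascii_capitalize_alt (input_str : String) : String :=
  let cs := input_str.toList
  let table : PySem.Dict Int (List Char) :=
    (PySem.Set.ofList cs).foldl
      (fun d ch => d.insert (ch.toNat : Int)
        (if PySem.Int.mod (ch.toNat : Int) 2 = 0 then PySem.Chars.upper [ch]
         else PySem.Chars.lower [ch]))
      PySem.Dict.empty
  String.mk (cs.flatMap (fun ch => table.getD (ch.toNat : Int) [ch]))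

-- ===== PRECONDITION & SPEC =====
def Spec_ascii_capitalize (input_str : String) (out : String) : Prop := out = ascii_capitalize_alt input_str
instance (input_str : String) (out : String) : Decidable (Spec_ascii_capitalize input_str out) := by unfold Spec_ascii_capitalize; infer_instance

-- ===== CLAIM (what is proved, stated in full; the proofs are below) =====
def Claim_equal_ascii_capitalize : Prop := ∀ (input_str : String), Dom_ascii_capitalize input_str → Spec_ascii_capitalize input_str (ascii_capitalize input_str)

-- ===== LEMMAS AND PROOFS =====

-- the per-character transformation both programs perform
def pvTr (c : Char) : List Char :=
  if PySem.Int.mod (c.toNat : Int) 2 = 0 then PySem.Chars.upper [c] else PySem.Chars.lower [c]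

lemma pvA_foldl (L : List Char) (acc : List Char) :
    L.foldl (fun result c =>
      if PySem.Int.mod (c.toNat : Int) 2 = 0 then result ++ PySem.Chars.upper [c]
      else result ++ PySem.Chars.lower [c]) acc = acc ++ L.flatMap pvTr := by
  induction L generalizing acc with
  | nil => simp
  | cons x t ih =>
    simp only [List.foldl_cons, List.flatMap_cons, pvTr]
    split <;> rw [ih] <;> simp

lemma pvOrd_inj (c x : Char) (h : (c.toNat : Int) = (x.toNat : Int)) : c = x := by
  have h2 : c.toNat = x.toNat := by exact_mod_cast h
  exact Char.ext (UInt32.toNat_inj.mp h2)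

lemma pvTable_getD (L : List Char) (d : PySem.Dict Int (List Char)) (c : Char) (dflt : List Char) :
    (L.foldl (fun d ch => d.insert (ch.toNat : Int) (pvTr ch)) d).getD (c.toNat : Int) dflt
      = if c ∈ L then pvTr c else d.getD (c.toNat : Int) dflt := by
  induction L generalizing d with
  | nil => simp
  | cons x t ih =>
    simp only [List.foldl_cons, ih, List.mem_cons]
    by_cases hct : c ∈ t
    · simp [hct]
    · simp only [hct, or_false]
      rw [PySem.Dict.getD_insert]
      by_cases hcx : c = x
      · subst hcx; simp
      · have : (c.toNat : Int) ≠ (x.toNat : Int) := fun h => hcx (pvOrd_inj c x h)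
        simp [this, hcx]

lemma pvFlatMap_congr (L : List Char) (f g : Char → List Char)
    (h : ∀ c ∈ L, f c = g c) : L.flatMap f = L.flatMap g := by
  induction L with
  | nil => rfl
  | cons x t ih =>
    simp only [List.flatMap_cons, h x (List.mem_cons_self), ih (fun c hc => h c (List.mem_cons_of_mem _ hc))]

-- ===== VERDICT (by name: the statement is the Claim_ definition above) =====
theorem ascii_capitalize_spec : Claim_equal_ascii_capitalize := by
  intro s _
  unfold Spec_ascii_capitalize ascii_capitalize ascii_capitalize_alt
  rw [pvA_foldl]
  simp only [List.nil_append]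
  congr 1
  refine (pvFlatMap_congr s.toList _ pvTr ?_).symm
  intro c hc
  show (List.foldl (fun d ch => d.insert (ch.toNat : Int) (pvTr ch))
          PySem.Dict.empty (PySem.Set.ofList s.toList)).getD (c.toNat : Int) [c] = pvTr c
  rw [pvTable_getD]
  simp [PySem.Set.mem_ofList, hc]
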